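-- pv_equiv track=rewrite | github.com/clay-matt/SCLGBS | utils.py | tighten
-- ===== SOURCE A (Python) =====
-- def tighten(word):
--     # returns the reduced word in the free group representing word
--     t_word = ''
--     w_len = len(word)
--     for i in range(w_len):
--         if t_word == '':
--             t_word = word[i]
--         else:
--             if t_word[-1] == word[i].swapcase():
--                 t_word = t_word[:-1]
--             else:
--                 t_word += word[i]
--     return t_word
-- ===== SOURCE B (Python) =====
-- def tighten(word):
--     # fixpoint reduction: repeatedly delete the leftmost adjacent inverse pair
--     # (a letter followed by its swapped-case partner) until none remains
--     chars = list(word)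
--     while True:
--         i = next((j for j in range(len(chars) - 1)
--                   if chars[j + 1] == chars[j].swapcase()), None)
--         if i is None:
--             return ''.join(chars)
--         del chars[i:i + 2]
-- ===== Notes on version B (the rewrite author's own statement) =====
-- stated objective: alternative
-- what changed: replaces the single left-to-right stack scan with a fixpoint loop that repeatedly finds and deletes the leftmost adjacent inverse (swapcase) pair until the word is fully reduced; correct because free-group reduction is confluent
import Mathlib
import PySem

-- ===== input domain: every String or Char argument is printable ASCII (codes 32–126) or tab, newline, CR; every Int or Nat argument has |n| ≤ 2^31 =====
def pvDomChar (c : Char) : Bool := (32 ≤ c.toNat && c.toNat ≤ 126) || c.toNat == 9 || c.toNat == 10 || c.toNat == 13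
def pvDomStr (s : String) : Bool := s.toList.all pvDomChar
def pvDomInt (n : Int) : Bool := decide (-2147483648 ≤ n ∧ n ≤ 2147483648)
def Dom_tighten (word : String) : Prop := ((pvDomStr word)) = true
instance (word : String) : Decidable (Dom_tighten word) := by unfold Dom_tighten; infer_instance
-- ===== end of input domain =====

-- B replaces A's single stack scan by a fixpoint loop deleting the leftmost adjacent inverse pair until none remains (a different algorithm of similar cost; return value proved equal).


-- Python's c.swapcase() for one character; exact on the ASCII domain
def pySwapcase (c : Char) : Char :=
  if PySem.Chars.islower c then PySem.Chars.upperChar c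
  else if PySem.Chars.isupper c then PySem.Chars.lowerChar c
  else c

-- ===== PORT A =====
-- A's loop body: t_word kept as a list of chars; t_word[-1] = getLast!, t_word[:-1] = dropLast, += = append
def tightenStepA (t : List Char) (c : Char) : List Char :=
  if t.isEmpty then [c]
  else if t.getLast! == pySwapcase c then t.dropLast
  else t ++ [c]

def tighten (word : String) : String :=
  String.ofList (word.toList.foldl tightenStepA [])

-- ===== PORT B =====
-- B's generator scan: first index j with chars[j+1] == chars[j].swapcase(), None if there is none
def findPair : List Char → Option Nat
  | a :: b :: t => if b == pySwapcase a then some 0 else (findPair (b :: t)).map (· + 1)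
  | _ => none

-- termination fact for the while-loop (cited by the port's decreasing_by)
theorem findPair_some_le : ∀ (l : List Char) (i : Nat), findPair l = some i → i + 2 ≤ l.length := by
  intro l
  induction l with
  | nil => intro i h; simp [findPair] at h
  | cons a t ih =>
    cases t with
    | nil => intro i h; simp [findPair] at h
    | cons b t2 =>
      intro i h
      simp only [findPair] at h
      split at h
      · simp at h ⊢; omega
      · rcases Option.map_eq_some_iff.mp h with ⟨j, hj, rfl⟩
        have := ih j hj
        simp at this ⊢
        omega

-- B's while-loop; 'del chars[i:i+2]' = take i ++ drop (i+2)
def tightenLoop (l : List Char) : List Char :=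
  match h : findPair l with
  | none => l
  | some i => tightenLoop (l.take i ++ l.drop (i + 2))
termination_by l.length
decreasing_by
  have := findPair_some_le l i h
  simp [List.length_append, List.length_take, List.length_drop]
  omega

def tighten_alt (word : String) : String :=
  String.ofList (tightenLoop word.toList)

-- ===== PRECONDITION & SPEC =====
def Spec_tighten (word : String) (out : String) : Prop := out = tighten_alt word
instance (word : String) (out : String) : Decidable (Spec_tighten word out) := by unfold Spec_tighten; infer_instance

-- ===== CLAIM =====
def Claim_equal_tighten : Prop := ∀ (word : String), Dom_tighten word → Spec_tighten word (tighten word)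

-- ===== LEMMAS AND PROOFS =====
theorem pv_toNat_ofNat (n : Nat) (h : n < 55296) : (Char.ofNat n).toNat = n := by
  have hv : n.isValidChar := Or.inl h
  simp [Char.ofNat, hv, Char.ofNatAux, Char.toNat]

theorem pv_char_le_iff (a b : Char) : (a ≤ b) ↔ a.toNat ≤ b.toNat := by
  rw [Char.le_def, UInt32.le_iff_toNat_le]; exact Iff.rfl

theorem pv_islower_iff (c : Char) : PySem.Chars.islower c = true ↔ (97 ≤ c.toNat ∧ c.toNat ≤ 122) := by
  simp only [PySem.Chars.islower, Bool.and_eq_true, decide_eq_true_eq, pv_char_le_iff]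
  exact Iff.rfl

theorem pv_isupper_iff (c : Char) : PySem.Chars.isupper c = true ↔ (65 ≤ c.toNat ∧ c.toNat ≤ 90) := by
  simp only [PySem.Chars.isupper, Bool.and_eq_true, decide_eq_true_eq, pv_char_le_iff]
  exact Iff.rfl

theorem swap_swap (c : Char) : pySwapcase (pySwapcase c) = c := by
  by_cases hl : 97 ≤ c.toNat ∧ c.toNat ≤ 122
  · have h1 : pySwapcase c = Char.ofNat (c.toNat - 32) := by
      simp [pySwapcase, PySem.Chars.upperChar, (pv_islower_iff c).mpr hl]
    have h2 : (Char.ofNat (c.toNat - 32)).toNat = c.toNat - 32 := pv_toNat_ofNat _ (by omega)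
    rw [h1]
    have hnl : ¬ PySem.Chars.islower (Char.ofNat (c.toNat - 32)) = true := by
      rw [pv_islower_iff, h2]; omega
    have hu : PySem.Chars.isupper (Char.ofNat (c.toNat - 32)) = true := by
      rw [pv_isupper_iff, h2]; omega
    simp only [pySwapcase, hnl, hu, if_true, if_false, Bool.false_eq_true, PySem.Chars.lowerChar, h2]
    rw [show c.toNat - 32 + 32 = c.toNat by omega, Char.ofNat_toNat]
  · by_cases hu : 65 ≤ c.toNat ∧ c.toNat ≤ 90
    · have h1 : pySwapcase c = Char.ofNat (c.toNat + 32) := by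
        have hnl : ¬ PySem.Chars.islower c = true := by rw [pv_islower_iff]; omega
        simp [pySwapcase, PySem.Chars.lowerChar, hnl, (pv_isupper_iff c).mpr hu]
      have h2 : (Char.ofNat (c.toNat + 32)).toNat = c.toNat + 32 := by
        apply pv_toNat_ofNat; omega
      rw [h1]
      have hl2 : PySem.Chars.islower (Char.ofNat (c.toNat + 32)) = true := by
        rw [pv_islower_iff, h2]; omega
      simp only [pySwapcase, hl2, if_true, PySem.Chars.upperChar, h2]
      rw [show c.toNat + 32 - 32 = c.toNat by omega, Char.ofNat_toNat]
    · have hnl : ¬ PySem.Chars.islower c = true := by rw [pv_islower_iff]; omega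
      have hnu : ¬ PySem.Chars.isupper c = true := by rw [pv_isupper_iff]; omega
      simp [pySwapcase, hnl, hnu]

-- proof-side view of A's state: the stack in top-first order
def stepB (s : List Char) (c : Char) : List Char :=
  match s with
  | [] => [c]
  | h :: t => if h == pySwapcase c then t else c :: h :: t

-- 'reduced' for a top-first stack: no adjacent pair cancels
def RedR (s : List Char) : Prop := List.IsChain (fun a b => a ≠ pySwapcase b) s

-- 'reduced' in word order
def Red (l : List Char) : Prop := List.IsChain (fun a b => b ≠ pySwapcase a) l

theorem stepA_eq_stepB_rev (r : List Char) (c : Char) :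
    tightenStepA r.reverse c = (stepB r c).reverse := by
  cases r with
  | nil => simp [tightenStepA, stepB]
  | cons h t =>
    simp only [tightenStepA, stepB, List.reverse_cons]
    have hne : (t.reverse ++ [h]).isEmpty = false := by simp
    rw [hne]
    simp only [Bool.false_eq_true, if_false]
    have hlast : (t.reverse ++ [h]).getLast! = h := by
      cases t.reverse <;> simp [List.getLast!]
    rw [hlast]
    by_cases hc : h = pySwapcase c
    · simp [hc]
    · simp [hc, beq_iff_eq]

theorem foldl_A_eq_B_rev (l : List Char) (r : List Char) :
    l.foldl tightenStepA r.reverse = (l.foldl stepB r).reverse := by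
  induction l generalizing r with
  | nil => simp
  | cons c l ih =>
    simp only [List.foldl_cons]
    rw [stepA_eq_stepB_rev, ih]

theorem swap_ne_of_ne_swap (c h : Char) (hne : h ≠ pySwapcase c) : c ≠ pySwapcase h := by
  intro hc
  exact hne (by rw [hc, swap_swap])

theorem redR_stepB (s : List Char) (c : Char) (hs : RedR s) : RedR (stepB s c) := by
  cases s with
  | nil => exact List.isChain_singleton c
  | cons h t =>
    simp only [stepB]
    split
    · exact hs.tail
    · rename_i hne
      exact List.isChain_cons_cons.mpr ⟨swap_ne_of_ne_swap c h (by simpa [beq_iff_eq] using hne), hs⟩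

theorem redR_foldl (l : List Char) (s : List Char) (hs : RedR s) : RedR (l.foldl stepB s) := by
  induction l generalizing s with
  | nil => exact hs
  | cons c l ih => exact ih _ (redR_stepB s c hs)

theorem stepB_pop (t : List Char) (a b : Char) (hb : b = pySwapcase a) (ht : RedR t) :
    stepB (stepB t a) b = t := by
  cases t with
  | nil => simp [stepB, hb, swap_swap]
  | cons h t2 =>
    simp only [stepB]
    by_cases hc : h = pySwapcase a
    · -- top of the stack cancels a; pushing b = swapcase a puts it back
      simp only [hc, beq_self_eq_true, if_true]
      cases t2 with
      | nil => simp [hb]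
      | cons y t3 =>
        have hy : h ≠ pySwapcase y := (List.isChain_cons_cons.mp ht).1
        have hnb : (y == pySwapcase b) = false := by
          simp only [beq_eq_false_iff_ne, ne_eq]
          intro hyb
          apply hy
          rw [hc, hyb, hb, swap_swap]
        simp only [hnb, Bool.false_eq_true, if_false]
        rw [hb]
    · -- a goes on top and b = swapcase a cancels it right away
      simp [hc, hb, swap_swap]

theorem foldl_nocancel (l s : List Char) (h : RedR (l.reverse ++ s)) :
    l.foldl stepB s = l.reverse ++ s := by
  induction l generalizing s with
  | nil => simp
  | cons c l ih =>
    have h' : RedR (l.reverse ++ c :: s) := by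
      simpa [List.append_assoc] using h
    have hstep : stepB s c = c :: s := by
      cases s with
      | nil => rfl
      | cons hd tl =>
        have hrel : c ≠ pySwapcase hd := (List.isChain_append_cons_cons.mp h').2.1
        have : ¬ (hd == pySwapcase c) = true := by
          simp only [beq_iff_eq]
          intro hh
          exact hrel (by rw [hh, swap_swap])
        simp [stepB, this]
    simp only [List.foldl_cons, hstep, List.reverse_cons, List.append_assoc,
      List.singleton_append]
    exact ih (c :: s) h'

theorem findPair_none_red : ∀ (l : List Char), findPair l = none → Red l := by
  intro l
  induction l with
  | nil => intro _; exact List.isChain_nil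
  | cons a t ih =>
    cases t with
    | nil => intro _; exact List.isChain_singleton a
    | cons b t2 =>
      intro h
      simp only [findPair] at h
      split at h
      · exact absurd h (by simp)
      · rename_i hne
        rw [Red, List.isChain_cons_cons]
        exact ⟨by simpa [beq_iff_eq] using hne, ih (by simpa using h)⟩

theorem red_iff_redR_reverse (l : List Char) : Red l ↔ RedR l.reverse := by
  rw [RedR, List.isChain_reverse]
  exact Iff.rfl

theorem findPair_some_decomp : ∀ (l : List Char) (i : Nat), findPair l = some i →
    ∃ u a b v, l = u ++ a :: b :: v ∧ u.length = i ∧ b = pySwapcase a := by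
  intro l
  induction l with
  | nil => intro i h; simp [findPair] at h
  | cons a t ih =>
    cases t with
    | nil => intro i h; simp [findPair] at h
    | cons b t2 =>
      intro i h
      simp only [findPair] at h
      split at h
      · rename_i hc
        obtain rfl : (0 : Nat) = i := by simpa using h
        exact ⟨[], a, b, t2, by simp, rfl, by simpa [beq_iff_eq] using hc⟩
      · rcases Option.map_eq_some_iff.mp h with ⟨j, hj, rfl⟩
        rcases ih j hj with ⟨u, x, y, v, hl, hlen, hxy⟩
        exact ⟨a :: u, x, y, v, by rw [List.cons_append, ← hl], by simp [hlen], hxy⟩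

theorem foldl_delete (u v : List Char) (a b : Char) (hb : b = pySwapcase a) (s : List Char)
    (hs : RedR s) :
    (u ++ a :: b :: v).foldl stepB s = (u ++ v).foldl stepB s := by
  rw [List.foldl_append, List.foldl_append]
  show List.foldl stepB (stepB (stepB (u.foldl stepB s) a) b) v = _
  rw [stepB_pop _ a b hb (redR_foldl u s hs)]

theorem tightenLoop_eq : ∀ (n : Nat) (l : List Char), l.length ≤ n →
    tightenLoop l = (l.foldl stepB []).reverse := by
  intro n
  induction n with
  | zero =>
    intro l hl
    have : l = [] := List.length_eq_zero_iff.mp (Nat.le_zero.mp hl)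
    subst this
    rw [tightenLoop]
    split
    · rfl
    · rename_i i hsome
      simp [findPair] at hsome
  | succ n ih =>
    intro l hl
    rw [tightenLoop]
    split
    · -- no cancelling pair: l is reduced and the stack scan returns it unchanged
      rename_i h
      have hred : RedR (l.reverse ++ []) := by
        simpa using (red_iff_redR_reverse l).mp (findPair_none_red l h)
      rw [foldl_nocancel l [] hred]
      simp
    · rename_i i h
      rcases findPair_some_decomp l i h with ⟨u, a, b, v, hldecomp, hlen, hb⟩
      have hdel : l.take i ++ l.drop (i + 2) = u ++ v := by
        subst hldecomp
        rw [← hlen, List.take_left]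
        have : (u ++ a :: b :: v) = (u ++ [a, b]) ++ v := by simp
        rw [this, List.drop_left' (by simp [hlen])]
      have hlen2 : (u ++ v).length ≤ n := by
        have h2 := findPair_some_le l i h
        have : l.length = u.length + 2 + v.length := by rw [hldecomp]; simp; omega
        simp only [List.length_append]
        omega
      rw [hdel, ih (u ++ v) hlen2,
        show l.foldl stepB [] = (u ++ v).foldl stepB [] by
          rw [hldecomp]; exact foldl_delete u v a b hb [] List.isChain_nil]

-- ===== VERDICT =====
theorem tighten_spec : Claim_equal_tighten := by
  intro word _
  unfold Spec_tighten tighten tighten_alt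
  have h1 := foldl_A_eq_B_rev word.toList []
  simp only [List.reverse_nil] at h1
  rw [h1, tightenLoop_eq word.toList.length word.toList le_rfl]
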